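-- pv_equiv track=rewrite | github.com/alexandraback/datacollection | solutions_5634697451274240_1/Python/ddoss/pancakes.py | solve
-- ===== SOURCE A (Python) =====
-- def solve(case):
--     num_inversions = 0
--     if case=='':
--         return 0
--
--     sym=case[0]
--     for i in range(len(case)):
--         if not case[i]==sym:
--             sym=case[i]
--             num_inversions+=1
--     if case[-1]=='-':
--         num_inversions+=1
--     return num_inversions
-- ===== SOURCE B (Python) =====
-- def solve(case):
--     if case == '':
--         return 0
--     # Count maximal runs of equal characters by repeatedly stripping the
--     # leading run; answer is runs - 1 transitions, plus 1 if case ends in '-'.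
--     runs = 0
--     s = case
--     while s:
--         runs += 1
--         head = s[0]
--         j = 1
--         while j < len(s) and s[j] == head:
--             j += 1
--         s = s[j:]
--     return runs - 1 + (1 if case[-1] == '-' else 0)
-- ===== Notes on version B (the rewrite author's own statement) =====
-- stated objective: alternative
-- what changed: Replaced A's single-pass running-symbol state machine (mutating sym and a transition counter per index) by run-splitting: repeatedly strip the whole leading maximal run off the string, count the runs, and return runs-1 plus the trailing-dash bonus.
import Mathlib
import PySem

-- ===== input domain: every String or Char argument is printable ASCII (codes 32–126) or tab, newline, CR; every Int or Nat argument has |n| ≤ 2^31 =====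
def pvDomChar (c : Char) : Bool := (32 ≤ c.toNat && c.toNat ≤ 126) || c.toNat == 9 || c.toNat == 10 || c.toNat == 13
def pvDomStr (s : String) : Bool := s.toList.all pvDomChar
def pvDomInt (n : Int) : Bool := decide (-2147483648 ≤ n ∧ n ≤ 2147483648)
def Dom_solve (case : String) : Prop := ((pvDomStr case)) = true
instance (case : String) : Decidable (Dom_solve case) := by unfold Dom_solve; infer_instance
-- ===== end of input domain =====

-- B replaces A's running-symbol state machine by run-splitting (repeatedly strip the
-- leading maximal run, count runs, return runs-1 plus the trailing-dash bonus);
-- objective: alternative decomposition, same value on every input.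

-- ===== PORT A =====
def solve (case : String) : Int :=
  if case = "" then 0
  else
    let l := case.toList
    let st := (PySem.List.pyRange 0 (l.length) 1).foldl
      (fun (st : Char × Int) i =>
        let c := PySem.List.pyGetD l i ' '
        if ¬ (c = st.1) then (c, st.2 + 1) else st)
      (PySem.List.pyGetD l 0 ' ', 0)
    if PySem.List.pyGet? l (-1) = some '-' then st.2 + 1 else st.2

-- ===== PORT B =====
-- inner while loop of Source B: skip the characters equal to the run's head
def dropRun (c : Char) : List Char → List Char
  | [] => []
  | x :: xs => if x == c then dropRun c xs else x :: xs

theorem dropRun_length_le (c : Char) (l : List Char) : (dropRun c l).length ≤ l.length := by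
  induction l with
  | nil => simp [dropRun]
  | cons x xs ih =>
    simp only [dropRun]
    split
    · exact Nat.le_trans ih (Nat.le_succ _)
    · exact Nat.le_refl _

-- outer while loop of Source B: count the maximal runs
def runsCount : List Char → Int
  | [] => 0
  | c :: rest => 1 + runsCount (dropRun c rest)
termination_by l => l.length
decreasing_by
  exact Nat.lt_succ_of_le (dropRun_length_le c rest)

def solve_alt (case : String) : Int :=
  if case = "" then 0
  else
    runsCount case.toList - 1
      + (if PySem.List.pyGet? case.toList (-1) = some '-' then 1 else 0)

-- ===== PRECONDITION & SPEC =====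
def Spec_solve (case : String) (out : Int) : Prop := out = solve_alt case
instance (case : String) (out : Int) : Decidable (Spec_solve case out) := by unfold Spec_solve; infer_instance

-- ===== CLAIM =====
def Claim_equal_solve : Prop := ∀ (case : String), Dom_solve case → Spec_solve case (solve case)

-- ===== LEMMAS AND PROOFS =====

-- A's fold (transition counter with running symbol sym) equals the number of runs
-- of the part of the list after stripping leading copies of sym.
theorem foldA_eq_runs (cs : List Char) (sym : Char) (acc : Int) :
    (cs.foldl (fun (st : Char × Int) c => if ¬ (c = st.1) then (c, st.2 + 1) else st)
      (sym, acc)).2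
    = acc + runsCount (dropRun sym cs) := by
  induction cs generalizing sym acc with
  | nil => simp [dropRun, runsCount]
  | cons c cs ih =>
    simp only [List.foldl_cons, dropRun]
    by_cases h : c = sym
    · subst h
      rw [if_neg (not_not_intro rfl)]
      simp only [beq_self_eq_true, if_true]
      exact ih _ _
    · rw [if_pos h]
      have hb : (c == sym) = false := by simp [h]
      simp only [hb, Bool.false_eq_true, if_false, runsCount]
      rw [ih]
      ring

-- ===== VERDICT =====
theorem solve_spec : Claim_equal_solve := by
  unfold Claim_equal_solve
  intro case _
  unfold Spec_solve
  by_cases hc : case = ""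
  · subst hc; simp [solve, solve_alt]
  · have hl : case.toList ≠ [] :=
      fun hn => hc (String.ext (by simpa using hn))
    simp only [solve, solve_alt, if_neg hc]
    rw [PySem.List.foldl_pyRange_zero_pyGetD' case.toList ' '
      (fun (st : Char × Int) c => if ¬ (c = st.1) then (c, st.2 + 1) else st)]
    obtain ⟨c, cs, h⟩ := List.exists_cons_of_ne_nil hl
    rw [h]
    simp only [List.foldl_cons, PySem.List.pyGetD_zero_cons, PySem.List.pyGet?_neg_one]
    simp only [not_true_eq_false, if_false]
    rw [foldA_eq_runs]
    have : runsCount (c :: cs) = 1 + runsCount (dropRun c cs) := by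
      simp [runsCount]
    rw [this]
    split <;> omega
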